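-- pv_equiv track=rewrite | github.com/ghghwldk/programmers-note | reference/programmers/basic_1/string/파일명정렬.py | convert
-- ===== SOURCE A (Python) =====
-- def convert(fileName, idx):
--     startNumber, endNumber = -1, -1
--     findingStart = True
--     for i in range(len(fileName)):
--         if findingStart:
--             if isNumber(fileName[i]):
--                 startNumber = i
--                 findingStart = False
--         else:
--             if not isNumber(fileName[i]):
--                 endNumber = i
--                 break
--         if i == len(fileName) -1:
--             endNumber = len(fileName) + 1
--     return fileName[:startNumber].upper(), int(fileName[startNumber:endNumber]), idx
--
-- def isNumber(c):
--     return c >= '0' and c <= '9'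
-- ===== SOURCE B (Python) =====
-- import re
--
-- def convert(fileName, idx):
--     m = re.search(r'\d+', fileName)
--     head = fileName[:m.start()] if m else ''
--     return head.upper(), int(m.group() if m else ''), idx
-- ===== Notes on version B (the rewrite author's own statement) =====
-- stated objective: idiomatic
-- what changed: Replaced the stateful findingStart/break character loop and its index bookkeeping with a single regex search for the first maximal digit run, slicing head and number from the match.
import Mathlib
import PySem

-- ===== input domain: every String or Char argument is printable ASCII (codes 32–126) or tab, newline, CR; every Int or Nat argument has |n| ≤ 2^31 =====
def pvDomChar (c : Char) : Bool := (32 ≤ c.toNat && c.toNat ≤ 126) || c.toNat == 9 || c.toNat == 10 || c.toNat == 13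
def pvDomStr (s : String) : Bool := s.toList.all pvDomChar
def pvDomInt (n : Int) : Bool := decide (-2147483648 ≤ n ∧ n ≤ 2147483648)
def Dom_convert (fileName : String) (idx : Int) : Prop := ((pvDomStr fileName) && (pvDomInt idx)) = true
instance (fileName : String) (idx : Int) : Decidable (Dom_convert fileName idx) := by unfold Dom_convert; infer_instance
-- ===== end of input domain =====

-- B replaces A's stateful findingStart/break scan with a single search for the
-- first maximal digit run (regex in Python, findIdx?/takeWhile here); idiomatic, not faster.


-- ===== PORT A =====
-- isNumber(c)
def isNumber (c : Char) : Bool := decide ('0' ≤ c) && decide (c ≤ '9')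

-- the for-loop of A: state (startNumber, endNumber, findingStart); returns the
-- final (startNumber, endNumber) (break returns immediately, before the i == len-1 check)
def convertLoop (cs : List Char) (i : Nat) (startN endN : Int) (finding : Bool) :
    Int × Int :=
  if h : i < cs.length then
    if finding then
      let startN' := if isNumber cs[i] then (i : Int) else startN
      let finding' := if isNumber cs[i] then false else true
      let endN' := if i = cs.length - 1 then (cs.length : Int) + 1 else endN
      convertLoop cs (i + 1) startN' endN' finding'
    else
      if ¬ isNumber cs[i] then (startN, (i : Int))   -- endNumber = i; break
      else
        let endN' := if i = cs.length - 1 then (cs.length : Int) + 1 else endN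
        convertLoop cs (i + 1) startN endN' false
  else (startN, endN)
termination_by cs.length - i

-- fileName[:startNumber].upper(), int(fileName[startNumber:endNumber]), idx
def convert (fileName : String) (idx : Int) : String × Int × Int :=
  (String.ofList (PySem.Chars.upper (PySem.List.slice fileName.toList none
      (some (convertLoop fileName.toList 0 (-1) (-1) true).1))),
   (PySem.Int.ofChars? (PySem.List.slice fileName.toList
      (some (convertLoop fileName.toList 0 (-1) (-1) true).1)
      (some (convertLoop fileName.toList 0 (-1) (-1) true).2))).getD 0,
   idx)

-- ===== PORT B =====
-- re.search(r'\d+', fileName): first digit index (findIdx?) + maximal digit run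
-- from it (takeWhile); head = fileName[:m.start()], number = int(m.group())
def convert_alt (fileName : String) (idx : Int) : String × Int × Int :=
  match fileName.toList.findIdx? isNumber with
  | some s =>
      (String.ofList (PySem.Chars.upper (fileName.toList.take s)),
       (PySem.Int.ofChars? ((fileName.toList.drop s).takeWhile isNumber)).getD 0, idx)
  | none => ("", (PySem.Int.ofChars? []).getD 0, idx)

-- ===== PRECONDITION & SPEC =====
-- Pre_ excludes exactly the inputs whose fileName contains no digit: there Python A
-- raises ValueError from int() (and Python B raises ValueError from int() as well).
def Pre_convert (fileName : String) (idx : Int) : Prop :=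
  fileName.toList.any isNumber = true
instance (fileName : String) (idx : Int) : Decidable (Pre_convert fileName idx) := by
  unfold Pre_convert; infer_instance

def pvWitness_convert : String × Int := ("img12.png", 3)

def Spec_convert (fileName : String) (idx : Int) (out : String × Int × Int) : Prop := out = convert_alt fileName idx
instance (fileName : String) (idx : Int) (out : String × Int × Int) : Decidable (Spec_convert fileName idx out) := by unfold Spec_convert; infer_instance

-- ===== CLAIM (what is proved, stated in full; the proofs are below) =====
def Claim_equal_convert : Prop := ∀ (fileName : String) (idx : Int), Dom_convert fileName idx → Pre_convert fileName idx → Spec_convert fileName idx (convert fileName idx)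

-- ===== LEMMAS AND PROOFS =====

-- phase 2 of the loop (findingStart = False): it stops at the first non-digit
-- after i (endNumber = that index), or runs off the end (endNumber = len + 1)
theorem convertLoop_false (cs : List Char) :
    ∀ n i startN endN, cs.length - i = n → i ≤ cs.length →
    convertLoop cs i startN endN false =
      (if i + ((cs.drop i).takeWhile isNumber).length < cs.length then
         (startN, ((i + ((cs.drop i).takeWhile isNumber).length : Nat) : Int))
       else if i < cs.length then (startN, (cs.length : Int) + 1)
       else (startN, endN)) := by
  intro n
  induction n with
  | zero =>
    intro i startN endN hn hi
    have hi' : i = cs.length := by omega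
    subst hi'
    rw [convertLoop]
    simp [List.drop_length]
  | succ n ih =>
    intro i startN endN hn hi
    have h : i < cs.length := by omega
    have hdrop : cs.drop i = cs[i] :: cs.drop (i + 1) := List.drop_eq_getElem_cons h
    rw [convertLoop, dif_pos h, if_neg Bool.false_ne_true]
    by_cases hd : isNumber cs[i]
    · rw [if_neg (by simp [hd])]
      rw [ih (i + 1) startN _ (by omega) (by omega)]
      have ht : ((cs.drop i).takeWhile isNumber).length
          = ((cs.drop (i + 1)).takeWhile isNumber).length + 1 := by
        rw [hdrop, List.takeWhile_cons, if_pos hd, List.length_cons]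
      rw [ht]
      split_ifs with h1 h2 h3 h4 h5 <;> first
        | rfl
        | (exfalso; omega)
        | (refine Prod.ext rfl ?_; push_cast; omega)
    · rw [if_pos (by simpa using hd)]
      have ht : ((cs.drop i).takeWhile isNumber).length = 0 := by
        rw [hdrop, List.takeWhile_cons, if_neg hd, List.length_nil]
      rw [ht]
      simp [h]

-- phase 1 of the loop: the final (startNumber, endNumber) in terms of the first
-- digit index and the length of the maximal digit run starting there
theorem convertLoop_true (cs : List Char) :
    ∀ n i startN endN, cs.length - i = n → i ≤ cs.length →
    convertLoop cs i startN endN true =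
      (match (cs.drop i).findIdx? isNumber with
       | none => (startN, if i < cs.length then (cs.length : Int) + 1 else endN)
       | some k =>
          if i + k + ((cs.drop (i + k)).takeWhile isNumber).length < cs.length then
            (((i + k : Nat) : Int), ((i + k + ((cs.drop (i + k)).takeWhile isNumber).length : Nat) : Int))
          else (((i + k : Nat) : Int), (cs.length : Int) + 1)) := by
  intro n
  induction n with
  | zero =>
    intro i startN endN hn hi
    have hi' : i = cs.length := by omega
    subst hi'
    rw [convertLoop]
    simp [List.drop_length]
  | succ n ih =>
    intro i startN endN hn hi
    have h : i < cs.length := by omega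
    have hdrop : cs.drop i = cs[i] :: cs.drop (i + 1) := List.drop_eq_getElem_cons h
    rw [convertLoop, dif_pos h, if_pos rfl]
    by_cases hd : isNumber cs[i]
    · have hfind : (cs.drop i).findIdx? isNumber = some 0 := by
        rw [hdrop, List.findIdx?_cons, if_pos hd]
      rw [hfind]
      simp only [if_pos hd]
      rw [convertLoop_false cs (cs.length - (i + 1)) (i + 1) _ _ rfl (by omega)]
      have ht : ((cs.drop (i + 0)).takeWhile isNumber).length
          = ((cs.drop (i + 1)).takeWhile isNumber).length + 1 := by
        rw [Nat.add_zero, hdrop, List.takeWhile_cons, if_pos hd, List.length_cons]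
      rw [ht]
      split_ifs with h1 h2 h3 h4 h5 <;> first
        | rfl
        | (exfalso; omega)
        | (refine Prod.ext (by push_cast; omega) ?_; push_cast; omega)
    · have hfind : (cs.drop i).findIdx? isNumber
          = ((cs.drop (i + 1)).findIdx? isNumber).map (· + 1) := by
        rw [hdrop, List.findIdx?_cons, if_neg hd]
      rw [hfind]
      simp only [if_neg hd]
      rw [ih (i + 1) startN _ (by omega) (by omega)]
      cases hfi : (cs.drop (i + 1)).findIdx? isNumber with
      | none =>
        simp only [Option.map_none]
        by_cases h2 : i + 1 < cs.length
        · simp only [if_pos h2, if_pos h]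
        · have hlast : i = cs.length - 1 := by omega
          simp only [if_neg h2, if_pos h, if_pos hlast]
      | some k =>
        simp only [Option.map_some]
        have harith : i + 1 + k = i + (k + 1) := by omega
        rw [harith]

-- the maximal digit run is an initial segment of the tail
theorem takeWhile_eq_take_len (p : Char → Bool) (l : List Char) :
    l.takeWhile p = l.take (l.takeWhile p).length :=
  List.prefix_iff_eq_take.mp (List.takeWhile_prefix p)

-- ===== VERDICT (by name: the statement is the Claim_ definition above) =====
theorem convert_spec : Claim_equal_convert := by
  intro fileName idx _hdom hpre
  unfold Spec_convert convert convert_alt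
  have hsome : (fileName.toList.findIdx? isNumber).isSome := by
    rw [List.findIdx?_isSome]; exact hpre
  obtain ⟨s, hs⟩ := Option.isSome_iff_exists.mp hsome
  have hslen : s < fileName.toList.length :=
    (List.findIdx?_eq_some_iff_findIdx_eq.mp hs).1
  rw [convertLoop_true fileName.toList (fileName.toList.length - 0) 0 (-1) (-1) rfl (by omega)]
  simp only [List.drop_zero, hs, Nat.zero_add]
  set t := ((fileName.toList.drop s).takeWhile isNumber).length with htdef
  have htle : t ≤ fileName.toList.length - s := by
    have := (List.takeWhile_prefix (l := fileName.toList.drop s) isNumber).length_le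
    simp only [List.length_drop] at this
    omega
  by_cases hcase : s + t < fileName.toList.length
  · rw [if_pos hcase]
    refine Prod.ext ?_ (Prod.ext ?_ rfl)
    · show String.ofList (PySem.Chars.upper (PySem.List.slice fileName.toList none (some ((s : Nat) : Int)))) = _
      rw [PySem.List.slice_to_natCast]
    · show (PySem.Int.ofChars? (PySem.List.slice fileName.toList (some ((s : Nat) : Int)) (some ((s + t : Nat) : Int)))).getD 0 = _
      rw [PySem.List.slice_natCast]
      have h1 : s + t - s = t := by omega
      rw [h1, htdef, ← takeWhile_eq_take_len]
  · rw [if_neg hcase]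
    refine Prod.ext ?_ (Prod.ext ?_ rfl)
    · show String.ofList (PySem.Chars.upper (PySem.List.slice fileName.toList none (some ((s : Nat) : Int)))) = _
      rw [PySem.List.slice_to_natCast]
    · show (PySem.Int.ofChars? (PySem.List.slice fileName.toList (some ((s : Nat) : Int)) (some ((fileName.toList.length : Int) + 1)))).getD 0 = _
      have hrun : (fileName.toList.drop s).takeWhile isNumber = fileName.toList.drop s := by
        have hteq : t = (fileName.toList.drop s).length := by
          simp only [List.length_drop]; omega
        rw [takeWhile_eq_take_len, ← htdef, hteq, List.take_length]
      have hcast : (fileName.toList.length : Int) + 1 = ((fileName.toList.length + 1 : Nat) : Int) := by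
        push_cast; ring
      rw [hcast, PySem.List.slice_natCast]
      have hle : (fileName.toList.drop s).length ≤ fileName.toList.length + 1 - s := by
        simp only [List.length_drop]; omega
      rw [List.take_of_length_le hle, hrun]
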